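-- pv_equiv track=rewrite | github.com/MareBouche/Master1Project-Domain_Enrichment | Domain_analyzer_Ath_Yeast_Human.py | count_interpro_domains
-- ===== SOURCE A (Python) =====
-- def count_interpro_domains(domains:list):
--     '''
--     A now redundant function
--
--     Works with the interpro list made in get_interpro_data() and counts the amount of time a IPR domain is found in the protein list.
--     Returns a IPR: count dictionairy and a dictonairy with Uniprot_id: set(IPRs)
--     by Wander
--     '''
--     count_dict = {}
--     protein_dict = {}
--     for accession in domains:
--         accession_id, entries = accession
--         for domain in entries:
--             interpro_id = domain[0]
--             if accession_id not in protein_dict.get(interpro_id, set()):  # make sure the gene is not counted already if duplicate domains are present (or splice vars)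
--                 count_dict[interpro_id] = count_dict.get(interpro_id, 0) + 1
--                 protein_dict[interpro_id] = protein_dict.get(interpro_id, set()) | {accession_id}
--
--     return count_dict, protein_dict
-- ===== SOURCE B (Python) =====
-- def count_interpro_domains(domains: list):
--     '''Staged rewrite: flatten the nested structure to a flat (ipr, accession)
--     pair list, dedup the pairs keeping first occurrences (dict.fromkeys), then
--     group the deduped pairs into protein_dict and derive counts as set sizes.'''
--     pairs = [(dom[0], accession_id) for accession_id, entries in domains for dom in entries]
--     protein_dict = {}
--     for ipr, acc in dict.fromkeys(pairs):
--         protein_dict.setdefault(ipr, set()).add(acc)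
--     count_dict = {ipr: len(s) for ipr, s in protein_dict.items()}
--     return count_dict, protein_dict
-- ===== Notes on version B (the rewrite author's own statement) =====
-- stated objective: alternative
-- what changed: B replaces A's stateful nested-loop dedup (membership guard plus running counter) by staged passes: flatten to a flat (ipr, accession) pair list, dedup the pairs with dict.fromkeys, group the deduped pairs into sets, then derive each count as the set size.
import Mathlib
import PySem

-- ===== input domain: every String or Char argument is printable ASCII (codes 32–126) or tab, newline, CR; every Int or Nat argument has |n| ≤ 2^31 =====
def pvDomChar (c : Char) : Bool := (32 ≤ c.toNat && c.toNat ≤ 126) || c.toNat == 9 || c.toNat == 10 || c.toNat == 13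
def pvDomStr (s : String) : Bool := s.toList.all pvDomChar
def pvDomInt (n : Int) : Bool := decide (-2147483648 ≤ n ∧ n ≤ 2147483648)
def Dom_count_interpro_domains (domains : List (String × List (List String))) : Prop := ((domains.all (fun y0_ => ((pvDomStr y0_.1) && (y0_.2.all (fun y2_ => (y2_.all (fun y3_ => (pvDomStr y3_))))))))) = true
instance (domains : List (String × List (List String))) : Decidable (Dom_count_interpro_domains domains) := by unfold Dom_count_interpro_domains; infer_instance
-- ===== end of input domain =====

-- B replaces A's stateful nested-loop dedup (membership guard + running counter) by staged
-- passes: flatten to (ipr, accession) pairs, dedup the pairs, group them, derive counts as set sizes.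

-- ===== PORT A =====
-- inner loop body: 'for domain in entries: ... if accession_id not in protein_dict.get(ipr, set()): ...'
def pvAInner (accession_id : String)
    (st : PySem.Dict String Int × PySem.Dict String (PySem.Set String)) (domain : List String) :
    PySem.Dict String Int × PySem.Dict String (PySem.Set String) :=
  let interpro_id := (PySem.List.pyGet? domain 0).getD ""   -- domain[0]; Python raises IndexError on [] (excluded by Pre_)
  if PySem.Set.contains (st.2.getD interpro_id PySem.Set.empty) accession_id then st
  else (st.1.insert interpro_id (st.1.getD interpro_id 0 + 1),
        st.2.insert interpro_id (PySem.Set.union (st.2.getD interpro_id PySem.Set.empty) [accession_id]))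

def pvAOuter (st : PySem.Dict String Int × PySem.Dict String (PySem.Set String))
    (accession : String × List (List String)) :
    PySem.Dict String Int × PySem.Dict String (PySem.Set String) :=
  accession.2.foldl (pvAInner accession.1) st

def count_interpro_domains (domains : List (String × List (List String))) : (List (String × Int)) × (List (String × List String)) :=
  let st := domains.foldl pvAOuter (PySem.Dict.empty, PySem.Dict.empty)
  (st.1.items, st.2.items)

-- ===== PORT B =====
-- 'pairs = [(dom[0], accession_id) for accession_id, entries in domains for dom in entries]'
def pvPairs (domains : List (String × List (List String))) : List (String × String) :=
  domains.flatMap (fun a => a.2.map (fun dom => ((PySem.List.pyGet? dom 0).getD "", a.1)))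

-- 'protein_dict.setdefault(ipr, set()).add(acc)'
def pvBStep (pd : PySem.Dict String (PySem.Set String)) (p : String × String) :
    PySem.Dict String (PySem.Set String) :=
  pd.modify p.1 PySem.Set.empty (fun s => PySem.Set.add s p.2)

def count_interpro_domains_alt (domains : List (String × List (List String))) : (List (String × Int)) × (List (String × List String)) :=
  let pairs := pvPairs domains
  let protein_dict := (PySem.List.dedup pairs).foldl pvBStep PySem.Dict.empty   -- dict.fromkeys(pairs)
  let count_dict := protein_dict.items.map (fun q => (q.1, (PySem.Set.len q.2 : Int)))
  (count_dict, protein_dict.items)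

-- ===== PRECONDITION & SPEC =====
-- Pre_ excludes inputs with an empty domain record (an empty inner list), on which Python's domain[0] raises IndexError in both A and B.
def Pre_count_interpro_domains (domains : List (String × List (List String))) : Prop :=
  ∀ p ∈ domains, ∀ d ∈ p.2, d ≠ []
instance (domains : List (String × List (List String))) : Decidable (Pre_count_interpro_domains domains) := by unfold Pre_count_interpro_domains; infer_instance

def pvWitness_count_interpro_domains : (List (String × List (List String))) :=
  [("P1", [["IPR1"], ["IPR1", "x"], ["IPR2"]]), ("P2", [["IPR1"]])]

def Spec_count_interpro_domains (domains : List (String × List (List String))) (out : (List (String × Int)) × (List (String × List String))) : Prop := out = count_interpro_domains_alt domains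
instance (domains : List (String × List (List String))) (out : (List (String × Int)) × (List (String × List String))) : Decidable (Spec_count_interpro_domains domains out) := by unfold Spec_count_interpro_domains; infer_instance

-- ===== CLAIM (what is proved, stated in full; the proofs are below) =====
def Claim_equal_count_interpro_domains : Prop := ∀ (domains : List (String × List (List String))), Dom_count_interpro_domains domains → Pre_count_interpro_domains domains → Spec_count_interpro_domains domains (count_interpro_domains domains)

-- ===== LEMMAS AND PROOFS =====

-- the value map relating A's counter to B's protein sets
def pvLen (p : String × PySem.Set String) : String × Int := (p.1, (p.2.length : Int))

-- A's pair-at-a-time step, over the flattened (ipr, accession) stream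
def pvAStep (st : PySem.Dict String Int × PySem.Dict String (PySem.Set String)) (p : String × String) :
    PySem.Dict String Int × PySem.Dict String (PySem.Set String) :=
  if PySem.Set.contains (st.2.getD p.1 PySem.Set.empty) p.2 then st
  else (st.1.insert p.1 (st.1.getD p.1 0 + 1),
        st.2.insert p.1 (PySem.Set.union (st.2.getD p.1 PySem.Set.empty) [p.2]))

lemma pv_keys_eq {cd : PySem.Dict String Int} {pd : PySem.Dict String (PySem.Set String)}
    (h : cd.items = pd.items.map pvLen) : cd.keys = pd.keys := by
  simp only [PySem.Dict.keys, h, List.map_map]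
  rfl

lemma pv_contains_eq {cd : PySem.Dict String Int} {pd : PySem.Dict String (PySem.Set String)}
    (h : cd.items = pd.items.map pvLen) (k : String) : cd.contains k = pd.contains k := by
  rw [PySem.Dict.contains_eq_decide_mem_keys, PySem.Dict.contains_eq_decide_mem_keys, pv_keys_eq h]

-- modify with a default is insert of the modified current value
lemma pv_modify_eq_insert (d : PySem.Dict String (PySem.Set String)) (k : String)
    (f : PySem.Set String → PySem.Set String) :
    d.modify k PySem.Set.empty f = d.insert k (f (d.getD k PySem.Set.empty)) :=
  PySem.Dict.ext_iff.mpr rfl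

-- Set.add only ever appends: the start list stays a prefix through a fold of adds
lemma pv_foldl_add_suffix (l : List (String × String)) :
    ∀ (s : PySem.Set (String × String)), ∃ t, l.foldl PySem.Set.add s = s ++ t := by
  induction l with
  | nil => intro s; exact ⟨[], by simp⟩
  | cons x rest ih =>
    intro s
    by_cases hx : x ∈ s
    · have : PySem.Set.add s x = s := by simp [PySem.Set.add, PySem.Set.contains, hx]
      simpa [this] using ih s
    · have hadd : PySem.Set.add s x = s ++ [x] := by simp [PySem.Set.add, PySem.Set.contains, hx]
      obtain ⟨t, ht⟩ := ih (s ++ [x])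
      exact ⟨x :: t, by simp [hadd, ht]⟩

-- flattening A's nested loops: the outer fold is a fold of pvAStep over pvPairs
lemma pv_fold_pairs (domains : List (String × List (List String))) :
    ∀ st, domains.foldl pvAOuter st = (pvPairs domains).foldl pvAStep st := by
  induction domains with
  | nil => intro st; rfl
  | cons a rest ih =>
    intro st
    have hinner : pvAOuter st a =
        (a.2.map (fun dom => ((PySem.List.pyGet? dom 0).getD "", a.1))).foldl pvAStep st := by
      rw [List.foldl_map]; rfl
    simp only [List.foldl_cons, pvPairs, List.flatMap_cons, List.foldl_append, hinner, ih]

-- core invariant: A's pair fold (with its counter) against B's fold over the deduped tail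
lemma pv_main (pairs : List (String × String)) :
    ∀ (seen : PySem.Set (String × String)) (cd : PySem.Dict String Int)
      (pd : PySem.Dict String (PySem.Set String)),
    (∀ i a, PySem.Set.contains (pd.getD i PySem.Set.empty) a = true ↔ (i, a) ∈ seen) →
    pd.keys.Nodup → cd.items = pd.items.map pvLen →
    (pairs.foldl pvAStep (cd, pd)).2 =
      ((pairs.foldl PySem.Set.add seen).drop seen.length).foldl pvBStep pd ∧
    (pairs.foldl pvAStep (cd, pd)).1.items =
      (((pairs.foldl PySem.Set.add seen).drop seen.length).foldl pvBStep pd).items.map pvLen := by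
  induction pairs with
  | nil =>
    intro seen cd pd _ _ h
    simp only [List.foldl_nil, List.drop_length]
    exact ⟨trivial, h⟩
  | cons p rest ih =>
    intro seen cd pd hinv hn h
    set k := p.1
    set a := p.2
    set s := pd.getD k PySem.Set.empty with hs
    simp only [List.foldl_cons]
    by_cases hc : a ∈ s
    · -- duplicate pair: A skips, the dedup drops it
      have hcs : PySem.Set.contains s a = true := by simpa [PySem.Set.contains] using hc
      have hps : p ∈ seen := by
        have := (hinv k a).1 hcs
        simpa using this
      have hA : pvAStep (cd, pd) p = (cd, pd) := by
        simp only [pvAStep]; rw [hcs]; simp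
      have hB : PySem.Set.add seen p = seen := by
        simp [PySem.Set.add, PySem.Set.contains, hps]
      rw [hA, hB]
      exact ih seen cd pd hinv hn h
    · -- new pair: A inserts and counts; the dedup keeps p, B groups it
      have hcs : PySem.Set.contains s a = false := by simpa [PySem.Set.contains] using hc
      have hps : p ∉ seen := by
        intro hmem
        have hh : PySem.Set.contains s a = true := (hinv k a).2 (by simpa using hmem)
        rw [hh] at hcs; exact absurd hcs (by simp)
      have hunion : PySem.Set.union s [a] = s ++ [a] := by
        show PySem.Set.add s a = _
        simp [PySem.Set.add, PySem.Set.contains, hc]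
      have hA : pvAStep (cd, pd) p =
          (cd.insert k (cd.getD k 0 + 1), pd.insert k (s ++ [a])) := by
        simp only [pvAStep]
        rw [hcs, hunion]
        simp
        exact ⟨rfl, rfl⟩
      have hBadd : PySem.Set.add seen p = seen ++ [p] := by
        simp [PySem.Set.add, PySem.Set.contains, hps]
      obtain ⟨t, ht⟩ := pv_foldl_add_suffix rest (seen ++ [p])
      have hdrop1 : (rest.foldl PySem.Set.add (seen ++ [p])).drop seen.length = p :: t := by
        rw [ht, List.append_assoc, List.drop_left]; rfl
      have hdrop2 : (rest.foldl PySem.Set.add (seen ++ [p])).drop (seen ++ [p]).length = t := by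
        rw [ht, List.drop_left]
      -- B's step on the fresh pair
      have hBStep : pvBStep pd p = pd.insert k (s ++ [a]) := by
        unfold pvBStep
        rw [pv_modify_eq_insert]
        show pd.insert k (PySem.Set.add s a) = _
        rw [show PySem.Set.add s a = s ++ [a] from by simp [PySem.Set.add, PySem.Set.contains, hc]]
      -- the counter's current value is the set's size
      have hcount : cd.getD k 0 = (s.length : Int) := by
        by_cases hcc : pd.contains k = true
        · rcases hg : pd.get? k with _ | v
          · rw [PySem.Dict.contains_eq_isSome_get?, hg] at hcc; simp at hcc
          · have hsv : s = v := by rw [hs, PySem.Dict.getD_eq_get?_getD, hg]; rfl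
            have hmem : (k, v) ∈ pd.items := PySem.Dict.mem_items_of_get?_eq_some pd hg
            have hmem' : (k, (v.length : Int)) ∈ cd.items := by
              rw [h]; exact List.mem_map.2 ⟨(k, v), hmem, rfl⟩
            have hcnd : cd.keys.Nodup := by rw [pv_keys_eq h]; exact hn
            rw [hsv]
            exact PySem.Dict.getD_of_mem_items cd hmem' hcnd 0
        · have h1 : cd.getD k 0 = 0 :=
            PySem.Dict.getD_of_not_contains cd _ (by rw [pv_contains_eq h]; simpa using hcc)
          have h2 : s = PySem.Set.empty := by
            rw [hs, PySem.Dict.getD_of_not_contains pd _ (by simpa using hcc)]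
          rw [h1, h2]; rfl
      -- the inserted items lists stay related by pvLen
      have hitems : (cd.insert k (cd.getD k 0 + 1)).items = (pd.insert k (s ++ [a])).items.map pvLen := by
        rw [PySem.Dict.items_insert, PySem.Dict.items_insert, pv_contains_eq h]
        by_cases hcc : pd.contains k = true
        · simp only [hcc, if_true, h, List.map_map]
          apply List.map_congr_left
          intro q _
          by_cases hqk : q.1 == k
          · simp [pvLen, Function.comp, hqk, hcount]
          · simp [pvLen, Function.comp, hqk]
        · simp only [hcc, if_false, Bool.false_eq_true, h, List.map_append, List.map_cons, List.map_nil]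
          simp [pvLen, hcount]
      -- the membership invariant after the insertion
      have hinv' : ∀ i b, PySem.Set.contains ((pd.insert k (s ++ [a])).getD i PySem.Set.empty) b = true
          ↔ (i, b) ∈ seen ++ [p] := by
        intro i b
        by_cases hik : i = k
        · rw [hik, PySem.Dict.getD_insert_self]
          constructor
          · intro hb
            have hb' : b ∈ s ++ [a] := by simpa [PySem.Set.contains] using hb
            rcases List.mem_append.1 hb' with hb1 | hb2
            · exact List.mem_append.2 (Or.inl ((hinv k b).1
                (by simpa [PySem.Set.contains] using hb1)))
            · refine List.mem_append.2 (Or.inr ?_)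
              rw [show b = a from by simpa using hb2]
              exact List.mem_singleton.2 rfl
          · intro hb
            rcases List.mem_append.1 hb with hb1 | hb2
            · have hh : PySem.Set.contains s b = true := (hinv k b).2 hb1
              have hbs : b ∈ s := by simpa [PySem.Set.contains] using hh
              simp [PySem.Set.contains, hbs]
            · have hba : b = a := congrArg Prod.snd (by simpa using hb2 : (k, b) = p)
              rw [hba]
              simp [PySem.Set.contains]
        · rw [PySem.Dict.getD_insert_of_ne pd (s ++ [a]) PySem.Set.empty hik]
          rw [hinv i b]
          constructor
          · intro hb; exact List.mem_append.2 (Or.inl hb)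
          · intro hb
            rcases List.mem_append.1 hb with hb1 | hb2
            · exact hb1
            · exact absurd (congrArg Prod.fst (by simpa using hb2 : (i, b) = p)) hik
      rw [hA, hBadd, hdrop1]
      simp only [List.foldl_cons, hBStep]
      have := ih (seen ++ [p]) (cd.insert k (cd.getD k 0 + 1)) (pd.insert k (s ++ [a]))
        hinv' (PySem.Dict.nodup_keys_insert _ _ _ hn) hitems
      rw [hdrop2] at this
      exact this

-- ===== VERDICT (by name: the statement is the Claim_ definition above) =====
theorem count_interpro_domains_spec : Claim_equal_count_interpro_domains := by
  intro domains _ _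
  have hd : PySem.List.dedup (pvPairs domains)
      = (pvPairs domains).foldl PySem.Set.add ([] : PySem.Set (String × String)) := by
    rw [PySem.List.dedup_eq_ofList]; rfl
  have hinv : ∀ i a, PySem.Set.contains ((PySem.Dict.empty : PySem.Dict String (PySem.Set String)).getD i PySem.Set.empty) a = true ↔ (i, a) ∈ ([] : PySem.Set (String × String)) := by
    intro i a
    simp [PySem.Dict.empty, PySem.Dict.getD, PySem.Dict.get?, PySem.Set.contains, PySem.Set.empty]
  obtain ⟨h1, h2⟩ := pv_main (pvPairs domains) [] PySem.Dict.empty PySem.Dict.empty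
    hinv PySem.Dict.nodup_keys_empty rfl
  simp only [List.length_nil, List.drop_zero] at h1 h2
  rw [← hd] at h1 h2
  unfold Spec_count_interpro_domains count_interpro_domains count_interpro_domains_alt
  rw [pv_fold_pairs]
  refine Prod.ext ?_ (congrArg PySem.Dict.items h1)
  show (List.foldl pvAStep (PySem.Dict.empty, PySem.Dict.empty) (pvPairs domains)).1.items
      = List.map (fun q => (q.1, (PySem.Set.len q.2 : Int)))
          (List.foldl pvBStep PySem.Dict.empty (PySem.List.dedup (pvPairs domains))).items
  rw [h2]
  exact List.map_congr_left (fun q _ => by simp [pvLen, PySem.Set.len])
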